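-- pv_equiv track=rewrite | github.com/ChaseParate/Advent-of-Code-2020 | day06/custom_customs.py | part2
-- ===== SOURCE A (Python) =====
-- def part2(puzzle_input):
--     sum_counts = 0
--
--     for group in puzzle_input:
--         lines = group.splitlines()
--         chars = set(char for char in group if char != '\n')
--         for char in chars:
--             if len([line for line in lines if char in line]) == len(lines):
--                 sum_counts += 1
--
--     return sum_counts
-- ===== SOURCE B (Python) =====
-- def part2(puzzle_input):
--     total = 0
--     for group in puzzle_input:
--         lines = group.splitlines()
--         if not lines:
--             continue
--         common = set(lines[0])
--         for line in lines[1:]: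
--             common &= set(line)
--         total += len(common)
--     return total
-- ===== Notes on version B (the rewrite author's own statement) =====
-- stated objective: simpler
-- what changed: Replaces A's candidate-character loop (enumerate every distinct char of the group, then re-scan all lines counting those containing it) with a single fold intersecting the character sets of the lines; empty groups are guarded and contribute 0.
import Mathlib
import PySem

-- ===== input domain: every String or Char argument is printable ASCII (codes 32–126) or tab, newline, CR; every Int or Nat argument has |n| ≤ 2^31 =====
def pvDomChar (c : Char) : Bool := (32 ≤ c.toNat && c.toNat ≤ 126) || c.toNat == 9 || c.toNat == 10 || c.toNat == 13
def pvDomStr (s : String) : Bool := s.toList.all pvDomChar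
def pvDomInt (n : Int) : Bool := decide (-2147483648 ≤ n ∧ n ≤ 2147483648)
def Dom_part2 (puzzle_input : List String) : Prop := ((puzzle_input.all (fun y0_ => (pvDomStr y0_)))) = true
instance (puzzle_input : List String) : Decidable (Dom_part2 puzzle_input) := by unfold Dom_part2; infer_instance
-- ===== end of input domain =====

-- B replaces A's per-character rescan of all lines by one fold intersecting the lines' character sets (simpler control flow, same cost class).


-- ===== PORT A =====
-- Python's 'char in line' with a single-character string is substring membership: ported as PySem.Str.isIn.
-- Iteration over the Python set 'chars' is ported as a fold over PySem.Set (first-occurrence order);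
-- the result, a sum of independent per-character tests, does not depend on that order.
def part2 (puzzle_input : List String) : Int :=
  puzzle_input.foldl (fun sum_counts group =>
    let lines := PySem.Str.splitlines group
    let chars : PySem.Set Char := PySem.Set.ofList (group.toList.filter (fun c => c ≠ '\n'))
    chars.foldl (fun s c =>
      if ((lines.filter (fun line => PySem.Str.isIn (String.ofList [c]) line)).length : Int)
          = (lines.length : Int)
      then s + 1 else s) sum_counts) 0

-- ===== PORT B =====
def part2_alt (puzzle_input : List String) : Int :=
  puzzle_input.foldl (fun total group =>
    match PySem.Str.splitlines group with
    | [] => total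
    | l :: ls =>
      let common : PySem.Set Char :=
        ls.foldl (fun s line => PySem.Set.inter s (PySem.Set.ofList line.toList))
          (PySem.Set.ofList l.toList)
      total + PySem.Set.len common) 0

-- ===== PRECONDITION & SPEC =====
def Spec_part2 (puzzle_input : List String) (out : Int) : Prop := out = part2_alt puzzle_input
instance (puzzle_input : List String) (out : Int) : Decidable (Spec_part2 puzzle_input out) := by unfold Spec_part2; infer_instance

-- ===== CLAIM (what is proved, stated in full; the proofs are below) =====
def Claim_equal_part2 : Prop := ∀ (puzzle_input : List String), Dom_part2 puzzle_input → Spec_part2 puzzle_input (part2 puzzle_input)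

-- ===== LEMMAS AND PROOFS =====

theorem singleton_infix_iff (c : Char) (l : List Char) : [c] <:+: l ↔ c ∈ l := by
  constructor
  · intro h; exact h.mem (List.mem_singleton_self c)
  · intro h
    obtain ⟨s, t, rfl⟩ := List.append_of_mem h
    exact ⟨s, t, by simp⟩

theorem cond_iff (lines : List String) (c : Char) :
    (((lines.filter (fun line => PySem.Str.isIn (String.ofList [c]) line)).length : Int)
        = (lines.length : Int))
      ↔ ∀ line ∈ lines, c ∈ line.toList := by
  rw [Int.natCast_inj]
  constructor
  · intro h line hline
    have := List.filter_eq_self.mp (List.filter_sublist.eq_of_length h) line hline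
    rw [PySem.Str.isIn_eq] at this
    have := (PySem.Chars.isIn_iff_infix _ _).mp this
    simp at this
    exact (singleton_infix_iff c line.toList).mp this
  · intro h
    have : List.filter (fun line => PySem.Str.isIn (String.ofList [c]) line) lines = lines := by
      rw [List.filter_eq_self]
      intro line hl
      rw [PySem.Str.isIn_eq]
      rw [PySem.Chars.isIn_iff_infix]
      simp
      exact (singleton_infix_iff c line.toList).mpr (h line hl)
    rw [this]

theorem common_mem (s : PySem.Set Char) (ls : List String) (c : Char) :
    c ∈ ls.foldl (fun s line => PySem.Set.inter s (PySem.Set.ofList line.toList)) s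
      ↔ c ∈ s ∧ ∀ line ∈ ls, c ∈ line.toList := by
  induction ls generalizing s with
  | nil => simp
  | cons x xs ih =>
      simp only [List.foldl_cons, ih, PySem.Set.mem_inter, PySem.Set.mem_ofList, List.mem_cons]
      constructor
      · rintro ⟨⟨h1, h2⟩, h3⟩
        exact ⟨h1, fun line hl => by rcases hl with rfl | hl; exact h2; exact h3 line hl⟩
      · rintro ⟨h1, h2⟩
        exact ⟨⟨h1, h2 x (Or.inl rfl)⟩, fun line hl => h2 line (Or.inr hl)⟩

theorem common_nodup (s : PySem.Set Char) (ls : List String) (hs : s.Nodup) :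
    (ls.foldl (fun s line => PySem.Set.inter s (PySem.Set.ofList line.toList)) s).Nodup := by
  induction ls generalizing s with
  | nil => exact hs
  | cons x xs ih => exact ih _ (PySem.Set.nodup_inter _ _ hs)

theorem go_base (isB : Char → Bool) (cur : List Char) (acc : List (List Char)) (S : List Char)
    (hcur : ∀ c ∈ cur, c ∈ S ∧ isB c = false)
    (hacc : ∀ l ∈ acc, ∀ c ∈ l, c ∈ S ∧ isB c = false) :
    ∀ l ∈ (if cur.isEmpty = true then acc.reverse else (cur.reverse :: acc).reverse),
      ∀ c ∈ l, c ∈ S ∧ isB c = false := by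
  split_ifs with h
  · intro l hl; exact hacc l (by simpa using hl)
  · intro l hl
    rcases (by simpa using hl : l ∈ acc ∨ l = cur.reverse) with h' | rfl
    · exact hacc l h'
    · intro c hc; exact hcur c (List.mem_reverse.mp hc)

theorem go_inv (isB : Char → Bool) : ∀ (n : Nat) (g cur : List Char) (acc : List (List Char))
    (S : List Char), g.length ≤ n →
    (∀ c ∈ g, c ∈ S) →
    (∀ c ∈ cur, c ∈ S ∧ isB c = false) →
    (∀ l ∈ acc, ∀ c ∈ l, c ∈ S ∧ isB c = false) →
    ∀ l ∈ PySem.Chars.splitlines.go isB g cur acc, ∀ c ∈ l, c ∈ S ∧ isB c = false := by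
  intro n
  induction n with
  | zero =>
      intro g cur acc S hlen hg hcur hacc
      have : g = [] := List.length_eq_zero_iff.mp (Nat.le_zero.mp hlen)
      subst this
      rw [PySem.Chars.splitlines.go.eq_def]
      exact go_base isB cur acc S hcur hacc
  | succ n ih =>
      intro g cur acc S hlen hg hcur hacc
      rw [PySem.Chars.splitlines.go.eq_def]
      split
      · exact go_base isB cur acc S hcur hacc
      · rename_i rest
        apply ih rest [] (cur.reverse :: acc) S
        · simp at hlen ⊢; omega
        · intro c hc; exact hg c (by simp [hc])
        · intro c hc; exact absurd hc List.not_mem_nil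
        · intro l hl c hc
          rcases List.mem_cons.mp hl with rfl | hl
          · exact hcur c (List.mem_reverse.mp hc)
          · exact hacc l hl c hc
      · rename_i c rest _
        split_ifs with hb
        · apply ih rest [] (cur.reverse :: acc) S
          · simp at hlen ⊢; omega
          · intro d hd; exact hg d (by simp [hd])
          · intro d hd; exact absurd hd List.not_mem_nil
          · intro l hl d hd
            rcases List.mem_cons.mp hl with rfl | hl
            · exact hcur d (List.mem_reverse.mp hd)
            · exact hacc l hl d hd
        · apply ih rest (c :: cur) acc S
          · simp at hlen ⊢; omega
          · intro d hd; exact hg d (by simp [hd])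
          · intro d hd
            rcases List.mem_cons.mp hd with rfl | hd
            · exact ⟨hg d (by simp), by simpa using hb⟩
            · exact hcur d hd
          · exact hacc

theorem go_ne_nil (isB : Char → Bool) : ∀ (n : Nat) (g cur : List Char) (acc : List (List Char)),
    g.length ≤ n →
    PySem.Chars.splitlines.go isB g cur acc = [] → g = [] ∧ cur = [] ∧ acc = [] := by
  intro n
  induction n with
  | zero =>
      intro g cur acc hlen h
      have hgnil : g = [] := List.length_eq_zero_iff.mp (Nat.le_zero.mp hlen)
      subst hgnil
      rw [PySem.Chars.splitlines.go.eq_def] at h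
      simp only at h
      split_ifs at h with hc
      · exact ⟨rfl, List.isEmpty_iff.mp hc, by simpa using h⟩
      · simp at h
  | succ n ih =>
      intro g cur acc hlen h
      rw [PySem.Chars.splitlines.go.eq_def] at h
      split at h
      · split_ifs at h with hc
        · exact ⟨rfl, List.isEmpty_iff.mp hc, by simpa using h⟩
        · simp at h
      · rename_i rest
        have := ih rest [] (cur.reverse :: acc) (by simp at hlen ⊢; omega) h
        simp at this
      · rename_i c rest _
        split_ifs at h with hb
        · have := ih rest [] (cur.reverse :: acc) (by simp at hlen ⊢; omega) h
          simp at this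
        · have := ih rest (c :: cur) acc (by simp at hlen ⊢; omega) h
          simp at this

theorem splitlines_chars (g : String) :
    ∀ l ∈ PySem.Str.splitlines g, ∀ c ∈ l.toList, c ∈ g.toList ∧ c ≠ '\n' := by
  intro l hl c hc
  have hl' : l.toList ∈ PySem.Chars.splitlines g.toList := by
    rw [← PySem.Str.splitlines_map_toList g]
    exact List.mem_map_of_mem hl
  unfold PySem.Chars.splitlines at hl'
  have := go_inv _ g.toList.length g.toList [] [] g.toList le_rfl
    (fun c h => h) (fun c h => absurd h List.not_mem_nil)
    (fun l h => absurd h List.not_mem_nil) l.toList hl' c hc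
  refine ⟨this.1, ?_⟩
  intro hEq
  have := this.2
  subst hEq
  simp at this

theorem splitlines_nil (g : String) (h : PySem.Str.splitlines g = []) : g.toList = [] := by
  have h' : PySem.Chars.splitlines g.toList = [] := by
    rw [← PySem.Str.splitlines_map_toList g, h]; rfl
  unfold PySem.Chars.splitlines at h'
  exact (go_ne_nil _ g.toList.length g.toList [] [] le_rfl h').1

theorem foldl_countP {α : Type} (p : α → Prop) [DecidablePred p] (l : List α) (s : Int) :
    l.foldl (fun s c => if p c then s + 1 else s) s
      = s + (l.filter (fun c => decide (p c))).length := by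
  induction l generalizing s with
  | nil => simp
  | cons x xs ih =>
      simp only [List.foldl_cons, List.filter_cons]
      by_cases h : p x
      · simp [h, ih]; ring
      · simp [h, ih]

theorem group_eq (s : Int) (g : String) :
    (let lines := PySem.Str.splitlines g
     let chars : PySem.Set Char := PySem.Set.ofList (g.toList.filter (fun c => c ≠ '\n'))
     chars.foldl (fun s c =>
       if ((lines.filter (fun line => PySem.Str.isIn (String.ofList [c]) line)).length : Int)
           = (lines.length : Int)
       then s + 1 else s) s)
    = (match PySem.Str.splitlines g with
       | [] => s
       | l :: ls =>
         s + PySem.Set.len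
           (ls.foldl (fun s line => PySem.Set.inter s (PySem.Set.ofList line.toList))
             (PySem.Set.ofList l.toList))) := by
  simp only
  cases hsl : PySem.Str.splitlines g with
  | nil =>
      rw [splitlines_nil g hsl]
      rfl
  | cons l ls =>
      rw [foldl_countP (fun c => ((((l :: ls).filter (fun line => PySem.Str.isIn (String.ofList [c]) line)).length : Int) = (((l :: ls).length : Nat) : Int)))]
      have nd1 : ((PySem.Set.ofList (g.toList.filter (fun c => c ≠ '\n'))).filter
          (fun c => decide ((((l :: ls).filter (fun line => PySem.Str.isIn (String.ofList [c]) line)).length : Int)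
            = (((l :: ls).length : Nat) : Int)))).Nodup :=
        (PySem.Set.nodup_ofList _).filter _
      have nd2 := common_nodup (PySem.Set.ofList l.toList) ls (PySem.Set.nodup_ofList _)
      have hperm := (List.perm_ext_iff_of_nodup nd1 nd2).mpr ?_
      · rw [hperm.length_eq]
        simp [PySem.Set.len]
      · intro c
        rw [List.mem_filter, common_mem, PySem.Set.mem_ofList, PySem.Set.mem_ofList,
          List.mem_filter]
        constructor
        · rintro ⟨⟨hcg, hnl⟩, hcond⟩
          have h := (cond_iff (l :: ls) c).mp (by exact_mod_cast of_decide_eq_true hcond)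
          exact ⟨h l (List.mem_cons_self), fun line hl => h line (List.mem_cons_of_mem l hl)⟩
        · rintro ⟨hcl, hls⟩
          have hall : ∀ line ∈ l :: ls, c ∈ line.toList := by
            intro line hl
            rcases List.mem_cons.mp hl with rfl | hl
            · exact hcl
            · exact hls line hl
          have hcg := splitlines_chars g l (hsl ▸ List.mem_cons_self) c hcl
          refine ⟨⟨hcg.1, by simpa using hcg.2⟩, decide_eq_true ((cond_iff (l :: ls) c).mpr hall)⟩

-- ===== VERDICT (by name: the statement is the Claim_ definition above) =====
theorem part2_spec : Claim_equal_part2 := by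
  intro puzzle_input hdom
  clear hdom
  unfold Spec_part2 part2 part2_alt
  induction puzzle_input using List.reverseRecOn with
  | nil => rfl
  | append_singleton xs g ih =>
      rw [List.foldl_append, List.foldl_append, List.foldl_cons, List.foldl_nil,
        List.foldl_cons, List.foldl_nil, ih]
      exact group_eq _ g
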